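-- pv_equiv track=rewrite | github.com/joonhoekim/algorithm-study | 프로그래머스/0/120903. 배열의 유사도/배열의 유사도.py | solution
-- ===== SOURCE A (Python) =====
-- def solution(s1, s2):
--     # 중복 없음
--     # 같은 원소 개수 리턴
--     # 해쉬테이블에 넣고 O(1)로 조회 반복하는 O(n)이 가장 빠를 듯
--     answer = 0
--     if len(s1) > len(s2):
--         long_set = set(s1)
--         short_set = set(s2)
--     else:
--         long_set = set(s2)
--         short_set = set(s1)
--     for el in short_set:
--         if el in long_set:
--             answer += 1
--             long_set.remove(el)
--     return answer
-- ===== SOURCE B (Python) =====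
-- def solution(s1, s2):
--     a = sorted(set(s1))
--     b = sorted(set(s2))
--     i = j = cnt = 0
--     while i < len(a) and j < len(b):
--         if a[i] == b[j]:
--             cnt += 1
--             i += 1
--             j += 1
--         elif a[i] < b[j]:
--             i += 1
--         else:
--             j += 1
--     return cnt
-- ===== Notes on version B (the rewrite author's own statement) =====
-- stated objective: alternative
-- what changed: Replaces A's hash-set membership-and-remove loop with a sort of each deduplicated array followed by a two-pointer ordered merge that counts equal heads.
import Mathlib
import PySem

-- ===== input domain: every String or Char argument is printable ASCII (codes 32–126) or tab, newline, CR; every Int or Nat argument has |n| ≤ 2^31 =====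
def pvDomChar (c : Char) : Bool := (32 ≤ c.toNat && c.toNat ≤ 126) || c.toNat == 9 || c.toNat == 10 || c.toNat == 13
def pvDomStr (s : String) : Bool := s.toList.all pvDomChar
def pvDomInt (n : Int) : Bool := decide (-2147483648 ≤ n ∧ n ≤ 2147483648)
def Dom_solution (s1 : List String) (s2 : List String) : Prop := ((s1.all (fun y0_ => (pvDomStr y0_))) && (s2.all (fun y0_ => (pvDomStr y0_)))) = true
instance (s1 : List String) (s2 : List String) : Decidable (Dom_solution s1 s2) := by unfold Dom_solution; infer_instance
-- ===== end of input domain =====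

-- B replaces A's hash-set membership-and-remove loop by sorting each deduplicated
-- list and counting equal heads in a two-pointer merge (alternative algorithm, same result).

-- ===== PORT A =====
-- for el in short_set: if el in long_set: answer += 1; long_set.remove(el)
-- (set iteration order is consumed only by an order-independent count; remove = erase of a present element)
def solutionLoop (state : Int × PySem.Set String) (el : String) : Int × PySem.Set String :=
  if el ∈ state.2 then (state.1 + 1, state.2.erase el) else state

def solution (s1 : List String) (s2 : List String) : Int :=
  let sets :=
    if s1.length > s2.length then (PySem.Set.ofList s1, PySem.Set.ofList s2)
    else (PySem.Set.ofList s2, PySem.Set.ofList s1)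
  (sets.2.foldl solutionLoop ((0 : Int), sets.1)).1

-- ===== PORT B =====
-- while i < len(a) and j < len(b): equal heads count and advance both; else advance the smaller side
def mergeCount : List String → List String → Int
  | x :: xs, y :: ys =>
    if x = y then 1 + mergeCount xs ys
    else if x < y then mergeCount xs (y :: ys)
    else mergeCount (x :: xs) ys
  | _, _ => 0

def solution_alt (s1 : List String) (s2 : List String) : Int :=
  let a := PySem.List.sorted (PySem.Set.ofList s1) (fun x => x) false
  let b := PySem.List.sorted (PySem.Set.ofList s2) (fun x => x) false
  mergeCount a b

-- ===== PRECONDITION & SPEC =====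
def Spec_solution (s1 : List String) (s2 : List String) (out : Int) : Prop := out = solution_alt s1 s2
instance (s1 : List String) (s2 : List String) (out : Int) : Decidable (Spec_solution s1 s2 out) := by unfold Spec_solution; infer_instance

-- ===== CLAIM (what is proved, stated in full; the proofs are below) =====
def Claim_equal_solution : Prop := ∀ (s1 : List String) (s2 : List String), Dom_solution s1 s2 → Spec_solution s1 s2 (solution s1 s2)

-- ===== LEMMAS AND PROOFS =====

-- A's loop: on a duplicate-free iteration list, the removal never affects a later
-- membership test, so the loop counts the elements of xs that lie in L.
theorem solutionLoop_foldl (xs : List String) (n : Int) (L : List String) (hx : xs.Nodup) :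
    (xs.foldl solutionLoop (n, L)).1 = n + ((xs.filter (· ∈ L)).length : Int) := by
  induction xs generalizing n L with
  | nil => simp
  | cons x xs ih =>
    have hxs := hx.of_cons
    have hxmem : x ∉ xs := (List.nodup_cons.mp hx).1
    by_cases h : x ∈ L
    · have hfilter : xs.filter (· ∈ L.erase x) = xs.filter (· ∈ L) := by
        apply List.filter_congr
        intro y hy
        have hne : y ≠ x := fun he => hxmem (he ▸ hy)
        simp [List.mem_erase_of_ne hne]
      simp only [List.foldl_cons, solutionLoop, h, if_pos, List.filter_cons]
      rw [ih _ _ hxs, hfilter]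
      simp
      omega
    · simp only [List.foldl_cons, solutionLoop, h, List.filter_cons]
      rw [ih _ _ hxs]
      simp

-- symmetry of the intersection count over duplicate-free lists
theorem filter_mem_length_comm (S T : List String) (hS : S.Nodup) (hT : T.Nodup) :
    (S.filter (· ∈ T)).length = (T.filter (· ∈ S)).length := by
  apply List.Perm.length_eq
  apply List.perm_of_nodup_nodup_toFinset_eq (hS.filter _) (hT.filter _)
  ext x
  simp
  tauto

-- B's merge on strictly increasing lists counts the elements of a that lie in b.
theorem mergeCount_eq (a b : List String) (ha : a.Pairwise (· < ·)) (hb : b.Pairwise (· < ·)) :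
    mergeCount a b = ((a.filter (· ∈ b)).length : Int) := by
  induction a generalizing b with
  | nil => simp [mergeCount]
  | cons x xs iha =>
    induction b with
    | nil => simp [mergeCount]
    | cons y ys ihb =>
      have hxs := ha.of_cons
      have hys := hb.of_cons
      by_cases hxy : x = y
      · subst hxy
        have hfilter : xs.filter (· ∈ x :: ys) = xs.filter (· ∈ ys) := by
          apply List.filter_congr
          intro z hz
          have : x < z := (List.pairwise_cons.mp ha).1 z hz
          have hne : z ≠ x := fun he => absurd (he ▸ this) (lt_irrefl x)
          simp [hne]
        simp only [mergeCount, if_pos, List.filter_cons]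
        rw [iha ys hxs hys, hfilter]
        simp
        omega
      · by_cases hlt : x < y
        · have hnx : x ∉ y :: ys := by
            intro hmem
            rcases List.mem_cons.mp hmem with h | h
            · exact hxy h
            · have : y < x := (List.pairwise_cons.mp hb).1 x h
              exact absurd (lt_trans hlt this) (lt_irrefl x)
          simp only [mergeCount, if_neg hxy, if_pos hlt, List.filter_cons]
          rw [iha (y :: ys) hxs hb]
          simp [hnx]
        · have hfilter : (x :: xs).filter (· ∈ y :: ys) = (x :: xs).filter (· ∈ ys) := by
            apply List.filter_congr
            intro z hz
            have hyx : y < x := by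
              rcases lt_trichotomy x y with h | h | h
              · exact absurd h hlt
              · exact absurd h hxy
              · exact h
            have hyz : y < z := by
              rcases List.mem_cons.mp hz with h | h
              · exact h ▸ hyx
              · exact lt_trans hyx ((List.pairwise_cons.mp ha).1 z h)
            have hne : z ≠ y := fun he => absurd (he ▸ hyz) (lt_irrefl y)
            simp [hne]
          simp only [mergeCount, if_neg hxy, if_neg hlt]
          rw [ihb hys, hfilter]

-- the two filter-counts a port produces, rewritten to the canonical (set s1, set s2) pair
theorem filter_length_congr (a S b T : List String)
    (hpa : a.Perm S) (hmb : ∀ z, z ∈ b ↔ z ∈ T) :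
    ((a.filter (· ∈ b)).length : Int) = ((S.filter (· ∈ T)).length : Int) := by
  have h1 : a.filter (· ∈ b) = a.filter (· ∈ T) := by
    apply List.filter_congr
    intro z _
    simp [hmb z]
  rw [h1]
  exact_mod_cast (hpa.filter _).length_eq

-- ===== VERDICT (by name: the statement is the Claim_ definition above) =====
theorem solution_spec : Claim_equal_solution := by
  intro s1 s2 _
  unfold Spec_solution solution solution_alt
  have n1 : (PySem.Set.ofList s1).Nodup := PySem.Set.nodup_ofList s1
  have n2 : (PySem.Set.ofList s2).Nodup := PySem.Set.nodup_ofList s2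
  have ha := PySem.List.sorted_ofList_pairwise_lt (xs := s1)
  have hb := PySem.List.sorted_ofList_pairwise_lt (xs := s2)
  have hpa : (PySem.List.sorted (PySem.Set.ofList s1) (fun x => x) false).Perm (PySem.Set.ofList s1) :=
    PySem.List.sorted_perm _ _ _
  have hpb : (PySem.List.sorted (PySem.Set.ofList s2) (fun x => x) false).Perm (PySem.Set.ofList s2) :=
    PySem.List.sorted_perm _ _ _
  have hB : mergeCount (PySem.List.sorted (PySem.Set.ofList s1) (fun x => x) false)
      (PySem.List.sorted (PySem.Set.ofList s2) (fun x => x) false)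
      = (((PySem.Set.ofList s1).filter (· ∈ PySem.Set.ofList s2)).length : Int) := by
    rw [mergeCount_eq _ _ ha hb]
    exact filter_length_congr _ _ _ _ hpa (fun z => by
      constructor
      · intro h; exact hpb.mem_iff.mp h
      · intro h; exact hpb.mem_iff.mpr h)
  by_cases hlen : s1.length > s2.length
  · rw [if_pos hlen]
    rw [solutionLoop_foldl _ _ _ n2, hB,
      filter_mem_length_comm (PySem.Set.ofList s2) (PySem.Set.ofList s1) n2 n1, zero_add]
  · rw [if_neg hlen]
    rw [solutionLoop_foldl _ _ _ n1, hB, zero_add]
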